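-- pv_equiv track=rewrite | github.com/soolabettu/euler | 358.py | last_k_repetend_digits_full_reptend_prime
-- ===== SOURCE A (Python) =====
-- def last_k_repetend_digits_full_reptend_prime(p, k=5):
--     """Return the final ``k`` digits of the repetend of ``1/p``.
--
--     Args:
--         p (int): Full reptend prime in base 10.
--         k (int): Number of trailing repetend digits to extract. Defaults to 5.
--
--     Returns:
--         str: Concatenated decimal digits (zero-padded as needed) representing
--         the last ``k`` digits of the repetend of ``1/p``.
--     """
--     L = p - 1  # full reptend ⇒ period p-1
--     r = pow(10, L - k, p)  # jump to offset L-k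
--     out = []
--     for _ in range(k):
--         t = 10 * r
--         out.append(t // p)  # next digit
--         r = t % p
--     return "".join(str(d) for d in out)  # zero-padding intrinsic per digit
-- ===== SOURCE B (Python) =====
-- def last_k_repetend_digits_full_reptend_prime(p, k=5):
--     """Return the final ``k`` digits of the repetend of ``1/p``: jump to the
--     offset with one modular exponentiation, then peel the digits off in
--     1000-digit blocks (one big division per block instead of one per digit)."""
--     if k < 1:
--         return ""
--     r = pow(10, p - 1 - k, p)
--     C = 1000
--     w = k % C or C          # width of the first (possibly short) block
--     parts = []
--     n = k
--     while n > 0: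
--         t = 10 ** w * r
--         parts.append(str(t // p).zfill(w))
--         r = t % p
--         n -= w
--         w = C
--     return "".join(parts)
-- ===== Notes on version B (the rewrite author's own statement) =====
-- stated objective: faster
-- what changed: A long-divides digit by digit in a k-iteration Python loop; B jumps to the offset once and then extracts the digits in 1000-digit blocks, one big-integer division and one zero-padded str per block, joining ceil(k/1000) chunks.
import Mathlib
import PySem

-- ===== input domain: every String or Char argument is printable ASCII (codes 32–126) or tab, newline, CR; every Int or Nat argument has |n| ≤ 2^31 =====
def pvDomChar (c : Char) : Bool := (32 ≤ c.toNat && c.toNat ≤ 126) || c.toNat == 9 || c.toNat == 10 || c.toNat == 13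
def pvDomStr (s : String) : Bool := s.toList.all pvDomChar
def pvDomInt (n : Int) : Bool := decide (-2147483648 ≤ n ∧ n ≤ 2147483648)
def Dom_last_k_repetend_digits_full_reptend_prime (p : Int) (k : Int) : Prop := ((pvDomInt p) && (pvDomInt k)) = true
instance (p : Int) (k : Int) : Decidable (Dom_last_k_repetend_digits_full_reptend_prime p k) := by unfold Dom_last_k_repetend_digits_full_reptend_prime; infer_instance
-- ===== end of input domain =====

-- B replaces A's per-digit long-division loop by a closed-form jump plus block
-- extraction: one big division and one zero-padded str per 1000-digit block.


-- ===== PORT A =====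
-- Shared helper: port of Python's three-argument pow(b, e, m).  A negative
-- exponent goes through a Bezout modular inverse, exactly Python's rule; it is
-- exact whenever Python returns (where Python raises — m = 0, or e < 0 with
-- gcd(b, m) ≠ 1 — those inputs are excluded by Pre_ below).
def pvInvMod (b m : Int) : Int := PySem.Int.mod (Int.gcdA b m) m

-- Square-and-multiply, the modular exponentiation CPython's pow performs
-- (PySem.Int.powMod's literal b^e is not evaluable for exponents ~2^31);
-- every branch returns PySem.Int.mod _ m, i.e. a value in Python's range.
def pvPowModAux (b : Int) (e : Nat) (m : Int) : Int :=
  if e = 0 then PySem.Int.mod 1 m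
  else
    let h := pvPowModAux b (e / 2) m
    if e % 2 = 0 then PySem.Int.mod (h * h) m
    else PySem.Int.mod (PySem.Int.mod (h * h) m * b) m
decreasing_by all_goals omega

def pvPowMod (b e m : Int) : Int :=
  if 0 ≤ e then pvPowModAux b e.toNat m
  else pvPowModAux (pvInvMod b m) (-e).toNat m

def last_k_repetend_digits_full_reptend_prime (p : Int) (k : Int) : String :=
  let L := p - 1
  let r := pvPowMod 10 (L - k) p
  let res := (PySem.List.pyRange 0 k).foldl
    (fun (st : Int × List Int) _ =>
      let t := 10 * st.1
      (PySem.Int.mod t p, st.2 ++ [PySem.Int.floordiv t p]))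
    (r, ([] : List Int))
  PySem.Str.join "" (res.2.map PySem.Int.toStr)

-- ===== PORT B =====
-- Port of Source B's while-loop (state r, n, w, parts), by recursion on n.
-- The '0 < w' conjunct only makes the recursion total: every call site has
-- 1 ≤ w (w = k % 1000 or 1000, then 1000), where Python's loop terminates.
-- '10 ** w' is ported as 10 ^ w.toNat (exact: w ≥ 1 at every call).
def pvChunks (p r n w : Int) (parts : List String) : List String :=
  if _h : 0 < n ∧ 0 < w then
    let t := 10 ^ w.toNat * r
    pvChunks p (PySem.Int.mod t p) (n - w) 1000
      (parts ++ [PySem.Str.zfill (PySem.Int.toStr (PySem.Int.floordiv t p)) w])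
  else parts
termination_by n.toNat
decreasing_by omega

def last_k_repetend_digits_full_reptend_prime_alt (p : Int) (k : Int) : String :=
  if k < 1 then ""
  else
    let r := pvPowMod 10 (p - 1 - k) p
    let w0 := PySem.Int.mod k 1000
    let w := if w0 = 0 then 1000 else w0    -- Python's 'k % C or C'
    PySem.Str.join "" (pvChunks p r k w [])

-- ===== PRECONDITION & SPEC =====
-- Exactly the inputs on which A returns: pow(10, p-1-k, p) needs p ≠ 0, and a
-- modular inverse of 10 (only) when the exponent p-1-k is negative (Python
-- raises ZeroDivisionError / ValueError otherwise).
def Pre_last_k_repetend_digits_full_reptend_prime (p : Int) (k : Int) : Prop :=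
  p ≠ 0 ∧ (0 ≤ p - 1 - k ∨ Int.gcd 10 p = 1)

instance (p : Int) (k : Int) : Decidable (Pre_last_k_repetend_digits_full_reptend_prime p k) := by
  unfold Pre_last_k_repetend_digits_full_reptend_prime; infer_instance

def pvWitness_last_k_repetend_digits_full_reptend_prime : Int × Int := (7, 3)

def Spec_last_k_repetend_digits_full_reptend_prime (p : Int) (k : Int) (out : String) : Prop :=
  out = last_k_repetend_digits_full_reptend_prime_alt p k

instance (p : Int) (k : Int) (out : String) : Decidable (Spec_last_k_repetend_digits_full_reptend_prime p k out) := by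
  unfold Spec_last_k_repetend_digits_full_reptend_prime; infer_instance

-- ===== CLAIM (what is proved, stated in full; the proofs are below) =====
def Claim_equal_last_k_repetend_digits_full_reptend_prime : Prop :=
  ∀ (p : Int) (k : Int), Dom_last_k_repetend_digits_full_reptend_prime p k →
    Pre_last_k_repetend_digits_full_reptend_prime p k →
    Spec_last_k_repetend_digits_full_reptend_prime p k (last_k_repetend_digits_full_reptend_prime p k)

-- ===== LEMMAS AND PROOFS =====


lemma join_nil_flatten (parts : List (List Char)) : PySem.Chars.join [] parts = parts.flatten := by
  induction parts with
  | nil => simp [PySem.Chars.join, List.intercalate]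
  | cons a l ih => cases l with
    | nil => simp [PySem.Chars.join, List.intercalate]
    | cons b m => rw [PySem.Chars.join_cons_cons]; simp_all

-- pvNatChars
def pvNatChars (n : Nat) : List Char :=
  if n < 10 then [Nat.digitChar n] else pvNatChars (n / 10) ++ [Nat.digitChar (n % 10)]
decreasing_by exact Nat.div_lt_self (by omega) (by norm_num)


lemma toDigitsCore_eq : ∀ (n : Nat), ∀ (f : Nat) (acc : List Char), n < f →
    Nat.toDigitsCore 10 f n acc = pvNatChars n ++ acc := by
  intro n
  induction n using Nat.strong_induction_on with
  | _ n ih =>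
    intro f acc hf
    match f with
    | f + 1 =>
      rw [Nat.toDigitsCore]
      by_cases h : n / 10 = 0
      · have h10 : n < 10 := by omega
        simp [h, pvNatChars, h10, Nat.mod_eq_of_lt h10]
      · have h10 : ¬ n < 10 := by omega
        rw [if_neg h, ih (n / 10) (by omega) f _ (by omega)]
        conv_rhs => rw [pvNatChars]
        rw [if_neg h10]
        simp
lemma toDigits_eq (n : Nat) : Nat.toDigits 10 n = pvNatChars n := by
  rw [Nat.toDigits, toDigitsCore_eq n (n+1) [] (by omega)]; simp

lemma natChars_single {d : Nat} (hd : d < 10) : pvNatChars d = [Nat.digitChar d] := by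
  rw [pvNatChars, if_pos hd]

lemma natChars_cons (n : Nat) : ∃ c cs, pvNatChars n = c :: cs ∧ c ≠ '+' ∧ c ≠ '-' := by
  induction n using Nat.strong_induction_on with
  | _ n ih =>
    by_cases h : n < 10
    · refine ⟨Nat.digitChar n, [], natChars_single h, ?_, ?_⟩ <;> (interval_cases n <;> decide)
    · obtain ⟨c, cs, hEq, h1, h2⟩ := ih (n / 10) (Nat.div_lt_self (by omega) (by norm_num))
      rw [pvNatChars, if_neg h, hEq]
      exact ⟨c, cs ++ [Nat.digitChar (n % 10)], rfl, h1, h2⟩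

lemma natChars_len_pos (n : Nat) : 0 < (pvNatChars n).length := by
  obtain ⟨c, cs, hEq, -, -⟩ := natChars_cons n
  simp [hEq]

lemma natChars_len_le : ∀ (n w : Nat), 1 ≤ w → n < 10 ^ w → (pvNatChars n).length ≤ w := by
  intro n
  induction n using Nat.strong_induction_on with
  | _ n ih =>
    intro w hw hn
    by_cases h : n < 10
    · rw [natChars_single h]; simpa using hw
    · have hw2 : 2 ≤ w := by
        by_contra hc
        have hw1 : w = 1 := by omega
        rw [hw1] at hn; simp at hn; omega
      have hpow : 10 ^ w = 10 ^ (w - 1) * 10 := by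
        rw [← pow_succ]; congr 1; omega
      have hdiv : n / 10 < 10 ^ (w - 1) := Nat.div_lt_of_lt_mul (by omega)
      have hrec := ih (n / 10) (Nat.div_lt_self (by omega) (by norm_num)) (w - 1) (by omega) hdiv
      rw [pvNatChars, if_neg h]
      rw [List.length_append, List.length_singleton]
      omega

-- padC
def padC (a w : Nat) : List Char := PySem.Chars.zfill (pvNatChars a) (w : Int)

lemma pad_single {d : Nat} (hd : d < 10) : padC d 1 = [Nat.digitChar d] := by
  rw [padC, natChars_single hd, PySem.Chars.zfill]
  simp

lemma digitChar_ne_sign {d : Nat} (hd : d < 10) : Nat.digitChar d ≠ '+' ∧ Nat.digitChar d ≠ '-' := by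
  interval_cases d <;> exact ⟨by decide, by decide⟩

lemma zfill_eval {c : Char} {cs : List Char} (hne : ¬(c = '+' ∨ c = '-')) (w : Nat) :
    PySem.Chars.zfill (c :: cs) (w : Int) =
      if w ≤ cs.length + 1 then c :: cs
      else List.replicate (w - (cs.length + 1)) '0' ++ (c :: cs) := by
  rw [PySem.Chars.zfill]
  by_cases h : w ≤ cs.length + 1
  · rw [if_pos (by simp; exact_mod_cast h), if_pos h]
  · rw [if_neg (by simp; omega), if_neg h, if_neg hne]
    simp

lemma replicate_zero_split (n : Nat) (hn : 1 ≤ n) :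
    List.replicate n '0' = List.replicate (n - 1) '0' ++ ['0'] := by
  conv_lhs => rw [show n = (n - 1) + 1 by omega]
  rw [List.replicate_succ']

lemma pad_step {a d n : Nat} (hn : 1 ≤ n) (ha : a < 10 ^ n) (hd : d < 10) :
    padC (10 * a + d) (n + 1) = padC a n ++ [Nat.digitChar d] := by
  obtain ⟨hdp, hdm⟩ := digitChar_ne_sign hd
  by_cases ha0 : a = 0
  · subst ha0
    have h1 : pvNatChars (10 * 0 + d) = [Nat.digitChar d] := by
      rw [Nat.mul_zero, Nat.zero_add]; exact natChars_single hd
    have h0 : pvNatChars 0 = ['0'] := by rw [natChars_single (by omega)]; rfl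
    rw [padC, padC, h1, h0, zfill_eval (by tauto) (n + 1), zfill_eval (by decide) n]
    simp only [List.length_nil, Nat.zero_add]
    rw [if_neg (show ¬ (n + 1 ≤ 0 + 1) by omega)]
    by_cases h1n : n = 1
    · subst h1n
      norm_num [List.replicate]
    · rw [if_neg (show ¬ (n ≤ 0 + 1) by omega)]
      rw [show n + 1 - (0 + 1) = n by omega, show n - (0 + 1) = n - 1 by omega,
        replicate_zero_split n hn]
  · have h10 : ¬ 10 * a + d < 10 := by omega
    have hdiv : (10 * a + d) / 10 = a := by omega
    have hmod : (10 * a + d) % 10 = d := by omega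
    have hstep : pvNatChars (10 * a + d) = pvNatChars a ++ [Nat.digitChar d] := by
      rw [pvNatChars, if_neg h10, hdiv, hmod]
    obtain ⟨c, cs, hEq, hcp, hcm⟩ := natChars_cons a
    have hla1 : 1 ≤ (pvNatChars a).length := natChars_len_pos a
    have hlan : (pvNatChars a).length ≤ n := natChars_len_le a n hn ha
    rw [hEq] at hla1 hlan
    simp only [List.length_cons] at hla1 hlan
    rw [padC, padC, hstep, hEq, List.cons_append, zfill_eval (by tauto) (n + 1),
      zfill_eval (by tauto) n]
    simp only [List.length_append, List.length_cons, List.length_nil, Nat.zero_add]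
    by_cases hla : n ≤ cs.length + 1
    · rw [if_pos (show n + 1 ≤ cs.length + 1 + 1 by omega), if_pos hla]
      simp
    · rw [if_neg (show ¬ (n + 1 ≤ cs.length + 1 + 1) by omega), if_neg hla]
      rw [show n + 1 - (cs.length + 1 + 1) = n - (cs.length + 1) by omega]
      simp [List.append_assoc]

-- digit arithmetic
def DNn (P R i : Nat) : Nat := 10 * (10 ^ i * R % P) / P
def NNn (P R n : Nat) : Nat := 10 ^ n * R / P

lemma DN_lt {P R : Nat} (hP : 0 < P) (i : Nat) : DNn P R i < 10 :=
  Nat.div_lt_of_lt_mul (by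
    have := Nat.mod_lt (10 ^ i * R) hP
    omega)

lemma NN_lt {P R : Nat} (_hP : 0 < P) (hR : R < P) (n : Nat) : NNn P R n < 10 ^ n :=
  Nat.div_lt_of_lt_mul (by
    have hpow : 0 < 10 ^ n := by positivity
    calc 10 ^ n * R < 10 ^ n * P := by exact (Nat.mul_lt_mul_left hpow).mpr hR
      _ = P * 10 ^ n := Nat.mul_comm _ _)

lemma NN_succ {P R : Nat} (hP : 0 < P) (n : Nat) :
    NNn P R (n + 1) = 10 * NNn P R n + DNn P R n := by
  unfold NNn DNn
  have e1 : 10 ^ (n + 1) * R = P * (10 * (10 ^ n * R / P)) + 10 * (10 ^ n * R % P) := by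
    calc 10 ^ (n + 1) * R = 10 * (10 ^ n * R) := by ring
      _ = 10 * (P * (10 ^ n * R / P) + 10 ^ n * R % P) := by rw [Nat.div_add_mod]
      _ = P * (10 * (10 ^ n * R / P)) + 10 * (10 ^ n * R % P) := by ring
  rw [e1, Nat.mul_add_div hP]

lemma mod_mul_pow (P R n : Nat) : 10 * (10 ^ n * R % P) % P = 10 ^ (n + 1) * R % P := by
  have h : 10 * (10 ^ n * R % P) % P = 10 * (10 ^ n * R) % P :=
    (Nat.ModEq.mul_left 10 (Nat.mod_modEq (10 ^ n * R) P))
  rw [h]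
  ring_nf

lemma join_pad {P R : Nat} (hP : 0 < P) (hR : R < P) :
    ∀ K, 1 ≤ K → (List.range K).map (fun i => Nat.digitChar (DNn P R i)) = padC (NNn P R K) K := by
  intro K hK
  induction K, hK using Nat.le_induction with
  | base =>
    have h0 : DNn P R 0 = NNn P R 1 := by
      unfold DNn NNn
      rw [Nat.mod_eq_of_lt (by simpa using hR)]
      norm_num
    rw [List.range_one, List.map_singleton, h0, pad_single (h0 ▸ DN_lt hP 0)]
  | succ K hK ih =>
    rw [List.range_succ, List.map_append, List.map_singleton, ih, NN_succ hP,
      pad_step hK (NN_lt hP hR K) (DN_lt hP K)]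

-- ===== A-side loop machinery =====
def stepF (p : Int) (st : Int × List Int) : Int × List Int :=
  (PySem.Int.mod (10 * st.1) p, st.2 ++ [PySem.Int.floordiv (10 * st.1) p])

lemma foldl_ign {α β : Type} (F : β → β) :
    ∀ (l : List α) (init : β), l.foldl (fun s _ => F s) init = F^[l.length] init := by
  intro l
  induction l with
  | nil => intro init; rfl
  | cons a t ih =>
    intro init
    rw [List.foldl_cons, ih (F init), List.length_cons, Function.iterate_succ_apply]

lemma iterF {P R : Nat} (_hP : 0 < P) (hR : R < P) :
    ∀ n, (stepF (P : Int))^[n] ((R : Int), ([] : List Int)) =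
      (((10 ^ n * R % P : Nat) : Int), (List.range n).map (fun i => ((DNn P R i : Nat) : Int))) := by
  intro n
  induction n with
  | zero => simp [Nat.mod_eq_of_lt hR]
  | succ n ih =>
    rw [Function.iterate_succ_apply', ih]
    unfold stepF
    have hc : (10 : Int) * ((10 ^ n * R % P : Nat) : Int) = ((10 * (10 ^ n * R % P) : Nat) : Int) := by
      push_cast; ring
    simp only [hc, PySem.Int.mod_natCast, PySem.Int.floordiv_natCast]
    rw [mod_mul_pow]
    rw [List.range_succ, List.map_append, List.map_singleton]
    rfl

lemma iter_neg (p : Int) :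
    ∀ (n : Nat) (r : Int) (out : List Int),
      (stepF p)^[n] (r, out) =
        ((-(((stepF (-p))^[n] (-r, out)).1)), ((stepF (-p))^[n] (-r, out)).2) := by
  intro n
  induction n with
  | zero => intro r out; simp
  | succ n ih =>
    intro r out
    have hstep : stepF p (r, out) =
        ((-((stepF (-p)) (-r, out)).1), ((stepF (-p)) (-r, out)).2) := by
      unfold stepF
      have h1 : (10 : Int) * r = -(10 * -r) := by ring
      simp only [Prod.mk.injEq]
      refine ⟨?_, ?_⟩
      · show PySem.Int.mod (10 * r) p = -PySem.Int.mod (10 * -r) (-p)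
        conv_lhs => rw [h1, show p = -(-p) by ring]
        rw [PySem.Int.mod_neg_neg]
      · show out ++ [PySem.Int.floordiv (10 * r) p] = out ++ [PySem.Int.floordiv (10 * -r) (-p)]
        conv_lhs => rw [h1, show p = -(-p) by ring]
        rw [PySem.Int.floordiv_neg_neg]
    rw [Function.iterate_succ_apply, hstep, ih, Function.iterate_succ_apply]
    simp

lemma flatten_singletons {α : Type} (l : List α) : (l.map (fun c => [c])).flatten = l := by
  induction l with
  | nil => rfl
  | cons a t ih => simp [ih]

lemma DN_shift (P R w j : Nat) : DNn P (10 ^ w * R % P) j = DNn P R (w + j) := by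
  have key : 10 ^ j * (10 ^ w * R % P) % P = 10 ^ (w + j) * R % P := by
    have h := (Nat.mod_modEq (10 ^ w * R) P).mul_left (10 ^ j)
    rw [h, ← Nat.mul_assoc, ← pow_add, Nat.add_comm j w]
  unfold DNn
  rw [key]

lemma digits_split (P R w K : Nat) (hw : w ≤ K) :
    (List.range K).map (fun i => Nat.digitChar (DNn P R i))
      = (List.range w).map (fun i => Nat.digitChar (DNn P R i))
        ++ (List.range (K - w)).map (fun j => Nat.digitChar (DNn P (10 ^ w * R % P) j)) := by
  conv_lhs => rw [show K = w + (K - w) by omega, List.range_add]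
  rw [List.map_append, List.map_map]
  congr 1
  apply List.map_congr_left
  intro j hj
  simp only [Function.comp_apply]
  rw [DN_shift]

lemma toChars_natCast (q : Nat) : PySem.Int.toChars (q : Int) = pvNatChars q := by
  rw [PySem.Int.toChars, if_neg (by omega)]
  rw [Int.toNat_natCast, toDigits_eq]

lemma toList_zfill_toStr (q : Nat) (w : Int) (hw : 0 ≤ w) :
    (PySem.Str.zfill (PySem.Int.toStr (q : Int)) w).toList = padC q w.toNat := by
  rw [PySem.Str.toList_zfill, PySem.Int.toList_toStr, toChars_natCast, padC]
  congr 1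
  omega

lemma chunks_flat {P : Nat} (hP : 0 < P) :
    ∀ (N : Nat) (n w : Int) (R : Nat) (parts : List String), R < P →
      n.toNat ≤ N → 0 < n → 1 ≤ w → w ≤ n → ((1000 : Int) ∣ (n - w)) →
      ((pvChunks (P : Int) (R : Int) n w parts).map String.toList).flatten
        = (parts.map String.toList).flatten
          ++ (List.range n.toNat).map (fun i => Nat.digitChar (DNn P R i)) := by
  intro N
  induction N with
  | zero =>
    intro n w R parts _ hN hn _ _ _
    omega
  | succ N ih =>
    intro n w R parts hR hN hn hw1 hwn hdvd
    rw [pvChunks, dif_pos ⟨hn, by omega⟩]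
    have hcast : (10 : Int) ^ w.toNat * (R : Int) = ((10 ^ w.toNat * R : Nat) : Int) := by
      push_cast; ring
    simp only [hcast, PySem.Int.mod_natCast, PySem.Int.floordiv_natCast]
    have hW1 : 1 ≤ w.toNat := by omega
    have hpart : (PySem.Str.zfill (PySem.Int.toStr ((10 ^ w.toNat * R / P : Nat) : Int)) w).toList
        = padC (NNn P R w.toNat) w.toNat := toList_zfill_toStr _ w (by omega)
    by_cases hnw : n - w = 0
    · rw [hnw, pvChunks, dif_neg (by omega)]
      rw [List.map_append, List.flatten_append, List.map_singleton, hpart]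
      have hKW : n.toNat = w.toNat := by omega
      rw [hKW, join_pad hP hR w.toNat hW1]
      simp
    · have h1000 : (1000 : Int) ≤ n - w := by omega
      have hrec := ih (n - w) 1000 (10 ^ w.toNat * R % P) 
        (parts ++ [PySem.Str.zfill (PySem.Int.toStr ((10 ^ w.toNat * R / P : Nat) : Int)) w])
        (Nat.mod_lt _ hP) (by omega) (by omega) (by omega) (by omega) (by omega)
      rw [hrec]
      rw [List.map_append, List.flatten_append, List.map_singleton, hpart]
      have hsplit := digits_split P R w.toNat n.toNat (by omega)
      rw [hsplit, join_pad hP hR w.toNat hW1, show (n - w).toNat = n.toNat - w.toNat by omega]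
      simp [List.append_assoc]

lemma chunks_neg :
    ∀ (N : Nat) (p r n w : Int) (parts : List String), n.toNat ≤ N →
      pvChunks p r n w parts = pvChunks (-p) (-r) n w parts := by
  intro N
  induction N with
  | zero =>
    intro p r n w parts hN
    rw [pvChunks]
    conv_rhs => rw [pvChunks]
    by_cases h : 0 < n ∧ 0 < w
    · omega
    · rw [dif_neg h, dif_neg h]
  | succ N ih =>
    intro p r n w parts hN
    rw [pvChunks]
    conv_rhs => rw [pvChunks]
    by_cases h : 0 < n ∧ 0 < w
    · rw [dif_pos h, dif_pos h]
      have hmod : PySem.Int.mod (10 ^ w.toNat * r) p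
          = -PySem.Int.mod (10 ^ w.toNat * -r) (-p) := by
        conv_lhs => rw [show (10:Int) ^ w.toNat * r = -(10 ^ w.toNat * -r) by ring,
          show p = -(-p) by ring]
        rw [PySem.Int.mod_neg_neg]
      have hdiv : PySem.Int.floordiv (10 ^ w.toNat * r) p
          = PySem.Int.floordiv (10 ^ w.toNat * -r) (-p) := by
        conv_lhs => rw [show (10:Int) ^ w.toNat * r = -(10 ^ w.toNat * -r) by ring,
          show p = -(-p) by ring]
        rw [PySem.Int.floordiv_neg_neg]
      simp only []
      rw [hmod, hdiv]
      have hrec := ih p (-PySem.Int.mod (10 ^ w.toNat * -r) (-p)) (n - w) 1000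
        (parts ++ [PySem.Str.zfill (PySem.Int.toStr (PySem.Int.floordiv (10 ^ w.toNat * -r) (-p))) w])
        (by omega)
      rw [neg_neg] at hrec
      exact hrec
    · rw [dif_neg h, dif_neg h]

lemma pyRange_nil (k : Int) (hk : k ≤ 0) : PySem.List.pyRange 0 k = [] := by
  simp [PySem.List.pyRange]
  omega

lemma foldA (p k r : Int) (hk : 0 ≤ k) :
    (PySem.List.pyRange 0 k).foldl
      (fun (st : Int × List Int) _ =>
        (PySem.Int.mod (10 * st.1) p, st.2 ++ [PySem.Int.floordiv (10 * st.1) p]))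
      (r, ([] : List Int)) = (stepF p)^[k.toNat] (r, []) := by
  rw [show k = ((k.toNat : Nat) : Int) from by omega, PySem.List.pyRange_zero_natCast,
    List.foldl_map]
  have h := foldl_ign (stepF p) (List.range k.toNat) ((r, []) : Int × List Int)
  rw [List.length_range] at h
  simp only [Int.toNat_natCast]
  exact h

lemma main_core (p k r : Int) (hp : 0 < p) (hr0 : 0 ≤ r) (hr : r < p) (hk : 1 ≤ k) :
    PySem.Str.join "" ((((stepF p)^[k.toNat] (r, ([] : List Int))).2).map PySem.Int.toStr)
      = PySem.Str.join ""
          (pvChunks p r k (if PySem.Int.mod k 1000 = 0 then (1000 : Int) else PySem.Int.mod k 1000) []) := by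
  have hpP : ((p.toNat : Nat) : Int) = p := Int.toNat_of_nonneg (by omega)
  have hrR : ((r.toNat : Nat) : Int) = r := Int.toNat_of_nonneg hr0
  have hkK : ((k.toNat : Nat) : Int) = k := Int.toNat_of_nonneg (by omega)
  set P := p.toNat with hPdef
  set R := r.toNat with hRdef
  set K := k.toNat with hKdef
  have hP0 : 0 < P := by omega
  have hRP : R < P := by omega
  have hK1 : 1 ≤ K := by omega
  refine String.toList_inj.mp ?_
  rw [PySem.Str.toList_join, PySem.Str.toList_join]
  have hempty : ("" : String).toList = [] := rfl
  rw [hempty, join_nil_flatten, join_nil_flatten]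
  rw [← hpP, ← hrR, ← hkK]
  rw [iterF hP0 hRP K]
  -- A side: flatten of singleton digit strings
  have hdigs : ((((((10 ^ K * R % P : Nat) : Int)), (List.range K).map fun i => ((DNn P R i : Nat) : Int)) :
        Int × List Int).2.map PySem.Int.toStr).map String.toList
      = (List.range K).map (fun i => [Nat.digitChar (DNn P R i)]) := by
    simp only [List.map_map]
    apply List.map_congr_left
    intro i _
    simp only [Function.comp_apply]
    rw [PySem.Int.toList_toStr, toChars_natCast, natChars_single (DN_lt hP0 i)]
  rw [hdigs]
  have hflat : ((List.range K).map (fun i => [Nat.digitChar (DNn P R i)])).flatten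
      = (List.range K).map (fun i => Nat.digitChar (DNn P R i)) := by
    rw [show (fun i => [Nat.digitChar (DNn P R i)])
        = (fun c => [c]) ∘ (fun i => Nat.digitChar (DNn P R i)) from rfl,
      ← List.map_map, flatten_singletons]
  rw [hflat]
  -- B side
  have hmodc : PySem.Int.mod ((K : Nat) : Int) 1000 = ((K % 1000 : Nat) : Int) := by
    exact_mod_cast PySem.Int.mod_natCast K 1000
  have hwcast : (if PySem.Int.mod ((K : Nat) : Int) 1000 = 0 then (1000 : Int)
        else PySem.Int.mod ((K : Nat) : Int) 1000)
      = (((if K % 1000 = 0 then 1000 else K % 1000 : Nat) : Nat) : Int) := by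
    rw [hmodc]
    by_cases h : K % 1000 = 0
    · rw [if_pos h, if_pos (show ((K % 1000 : Nat) : Int) = 0 by exact_mod_cast h)]
      norm_num
    · rw [if_neg (show ¬ ((K % 1000 : Nat) : Int) = 0 by exact_mod_cast h), if_neg h]
  rw [hwcast]
  set W : Nat := if K % 1000 = 0 then 1000 else K % 1000 with hWdef
  have hW1 : 1 ≤ W := by
    rw [hWdef]; by_cases h : K % 1000 = 0
    · rw [if_pos h]; omega
    · rw [if_neg h]; omega
  have hWK : W ≤ K := by
    rw [hWdef]; by_cases h : K % 1000 = 0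
    · rw [if_pos h]; omega
    · rw [if_neg h]; exact Nat.mod_le K 1000
  have hdvd : 1000 ∣ (K - W) := by
    rw [hWdef]; by_cases h : K % 1000 = 0
    · rw [if_pos h]; omega
    · rw [if_neg h]; omega
  rw [chunks_flat hP0 K ((K : Nat) : Int) ((W : Nat) : Int) R []
    hRP (by omega) (by exact_mod_cast hK1) (by exact_mod_cast hW1) (by exact_mod_cast hWK)
    (by
      rw [show ((K : Nat) : Int) - ((W : Nat) : Int) = ((K - W : Nat) : Int) by omega]
      exact_mod_cast hdvd)]
  simp [Int.toNat_natCast]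

lemma powModAux_shape (b : Int) (e : Nat) (m : Int) :
    ∃ X, pvPowModAux b e m = PySem.Int.mod X m := by
  rw [pvPowModAux]
  simp only []
  by_cases h : e = 0
  · rw [if_pos h]; exact ⟨1, rfl⟩
  · rw [if_neg h]
    by_cases h2 : e % 2 = 0
    · rw [if_pos h2]; exact ⟨_, rfl⟩
    · rw [if_neg h2]; exact ⟨_, rfl⟩

lemma powMod_shape (b e m : Int) : ∃ X, pvPowMod b e m = PySem.Int.mod X m := by
  rw [pvPowMod]
  by_cases h : 0 ≤ e
  · rw [if_pos h]; exact powModAux_shape b e.toNat m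
  · rw [if_neg h]; exact powModAux_shape _ (-e).toNat m

lemma ports_eq (p k : Int) (hp0 : p ≠ 0) : last_k_repetend_digits_full_reptend_prime p k = last_k_repetend_digits_full_reptend_prime_alt p k := by
  unfold last_k_repetend_digits_full_reptend_prime last_k_repetend_digits_full_reptend_prime_alt
  by_cases hk : k < 1
  · rw [if_pos hk, pyRange_nil k (by omega)]
    simp only [List.foldl_nil, List.map_nil]
    refine String.toList_inj.mp ?_
    rw [PySem.Str.toList_join, show ("" : String).toList = [] from rfl, join_nil_flatten]
    simp
  · rw [if_neg hk]
    simp only []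
    rw [foldA p k _ (by omega)]
    obtain ⟨X, hX⟩ := powMod_shape 10 (p - 1 - k) p
    rw [hX]
    rcases lt_or_gt_of_ne hp0 with hneg | hpos
    · have hb := PySem.Int.mod_neg_bounds X hneg
      rw [iter_neg p k.toNat (PySem.Int.mod X p) []]
      simp only []
      rw [chunks_neg k.toNat p (PySem.Int.mod X p) k _ [] (le_refl _)]
      exact main_core (-p) k (-(PySem.Int.mod X p)) (by omega) (by omega) (by omega) (by omega)
    · have hb1 := PySem.Int.mod_nonneg X hpos
      have hb2 := PySem.Int.mod_lt X hpos
      exact main_core p k (PySem.Int.mod X p) hpos hb1 hb2 (by omega)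

-- ===== VERDICT (by name: the statement is the Claim_ definition above) =====
theorem last_k_repetend_digits_full_reptend_prime_spec : Claim_equal_last_k_repetend_digits_full_reptend_prime := by
  intro p k _ hpre
  unfold Spec_last_k_repetend_digits_full_reptend_prime
  exact ports_eq p k hpre.1
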